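-- pv_equiv track=rewrite | github.com/cvermilion/adventofcode | 2021/10/run.py | first_illegal
-- ===== SOURCE A (Python) =====
-- closers = {
-- 	"(": ")",
-- 	"{": "}",
-- 	"[": "]",
-- 	"<": ">"
-- }
--
-- def first_illegal(stack, text):
-- 	if not text:
-- 		return None
-- 	top = stack[-1] if stack else None
-- 	nxt, text = text[0], text[1:]
-- 	if top in closers and closers[top] == nxt:
-- 		stack.pop()
-- 		return first_illegal(stack, text)
-- 	if nxt not in closers:
-- 		return nxt
-- 	stack.append(nxt)
-- 	return first_illegal(stack, text)
-- ===== SOURCE B (Python) =====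
-- closers = {
-- 	"(": ")",
-- 	"{": "}",
-- 	"[": "]",
-- 	"<": ">"
-- }
--
-- def first_illegal(stack, text):
-- 	for ch in text:
-- 		if stack and closers.get(stack[-1]) == ch:
-- 			stack.pop()
-- 		elif ch not in closers:
-- 			return ch
-- 		else:
-- 			stack.append(ch)
-- 	return None
-- ===== Notes on version B (the rewrite author's own statement) =====
-- stated objective: simpler
-- what changed: Replaced the recursive definition that re-slices the remaining text (text[1:]) on every step with a single iterative for-loop over the characters, keeping the same stack discipline.
import Mathlib
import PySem

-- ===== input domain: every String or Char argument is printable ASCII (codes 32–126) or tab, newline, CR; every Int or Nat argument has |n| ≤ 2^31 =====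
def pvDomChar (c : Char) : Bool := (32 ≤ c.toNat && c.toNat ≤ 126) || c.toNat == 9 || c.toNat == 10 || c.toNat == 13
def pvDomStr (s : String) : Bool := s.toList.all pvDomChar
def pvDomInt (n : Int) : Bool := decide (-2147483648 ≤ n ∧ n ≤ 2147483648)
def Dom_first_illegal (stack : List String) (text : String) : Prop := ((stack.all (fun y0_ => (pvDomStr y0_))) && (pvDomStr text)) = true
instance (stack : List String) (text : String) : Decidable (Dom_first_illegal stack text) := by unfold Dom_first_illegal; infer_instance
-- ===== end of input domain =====

-- B replaces A's recursion over text[1:] slices by one iterative loop over the characters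
-- (plainer, no recursion/slicing); B performs the same pops/appends on `stack` as A, so side effects match.

-- module-level dict `closers`, shared by both Python versions
def pyClosers : PySem.Dict String String := PySem.Dict.ofList [("(", ")"), ("{", "}"), ("[", "]"), ("<", ">")]

-- ===== PORT A =====
-- A's recursion: text[0] / text[1:] becomes structural recursion on the char list
def first_illegal_goA : List String → List Char → Option String
  | _, [] => none
  | stack, c :: rest =>
    -- top = stack[-1] if stack else None
    let top : Option String := stack.getLast?
    let nxt : String := String.ofList [c]
    match top with
    | some t =>
      if pyClosers.get? t = some nxt then
        first_illegal_goA stack.dropLast rest          -- stack.pop(); recurse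
      else if (pyClosers.get? nxt).isNone then some nxt -- nxt not in closers
      else first_illegal_goA (stack ++ [nxt]) rest      -- stack.append(nxt); recurse
    | none =>
      if (pyClosers.get? nxt).isNone then some nxt
      else first_illegal_goA (stack ++ [nxt]) rest

def first_illegal (stack : List String) (text : String) : Option String :=
  first_illegal_goA stack text.toList

-- ===== PORT B =====
-- one loop step: Left s = "already returned s", Right stk = current stack
def first_illegal_step (st : String ⊕ List String) (c : Char) : String ⊕ List String :=
  match st with
  | .inl s => .inl s
  | .inr stk =>
    let s : String := String.ofList [c]
    match stk.getLast? with
    | some t =>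
      if pyClosers.get? t = some s then .inr stk.dropLast
      else if (pyClosers.get? s).isNone then .inl s
      else .inr (stk ++ [s])
    | none =>
      if (pyClosers.get? s).isNone then .inl s
      else .inr (stk ++ [s])

def first_illegal_alt (stack : List String) (text : String) : Option String :=
  match text.toList.foldl first_illegal_step (Sum.inr stack) with
  | .inl s => some s
  | .inr _ => none

-- ===== PRECONDITION & SPEC =====
def Spec_first_illegal (stack : List String) (text : String) (out : Option String) : Prop := out = first_illegal_alt stack text
instance (stack : List String) (text : String) (out : Option String) : Decidable (Spec_first_illegal stack text out) := by unfold Spec_first_illegal; infer_instance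

-- ===== CLAIM (what is proved, stated in full; the proofs are below) =====
def Claim_equal_first_illegal : Prop := ∀ (stack : List String) (text : String), Dom_first_illegal stack text → Spec_first_illegal stack text (first_illegal stack text)

-- ===== LEMMAS AND PROOFS =====

theorem foldl_step_inl (s : String) (cs : List Char) :
    cs.foldl first_illegal_step (Sum.inl s) = Sum.inl s := by
  induction cs with
  | nil => rfl
  | cons c rest ih => simpa [first_illegal_step] using ih

theorem goA_eq_fold (cs : List Char) (stack : List String) :
    first_illegal_goA stack cs =
      (match cs.foldl first_illegal_step (Sum.inr stack) with
       | .inl s => some s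
       | .inr _ => none) := by
  induction cs generalizing stack with
  | nil => rfl
  | cons c rest ih =>
    simp only [List.foldl_cons]
    cases h : stack.getLast? with
    | none =>
      by_cases hn : (pyClosers.get? (String.ofList [c])).isNone
      · simp [first_illegal_goA, first_illegal_step, h, hn, foldl_step_inl]
      · simp [first_illegal_goA, first_illegal_step, h, hn, ih]
    | some t =>
      by_cases hm : pyClosers.get? t = some (String.ofList [c])
      · simp [first_illegal_goA, first_illegal_step, h, hm, ih]
      · by_cases hn : (pyClosers.get? (String.ofList [c])).isNone
        · simp [first_illegal_goA, first_illegal_step, h, hm, hn, foldl_step_inl]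
        · simp [first_illegal_goA, first_illegal_step, h, hm, hn, ih]

-- ===== VERDICT (by name: the statement is the Claim_ definition above) =====
theorem first_illegal_spec : Claim_equal_first_illegal := by
  intro stack text _
  unfold Spec_first_illegal first_illegal first_illegal_alt
  exact goA_eq_fold text.toList stack
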